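-- pv_equiv track=rewrite | github.com/kkarakas-lxera/lxera-vision-platform | openai_course_generator/_archive/old_generators/intelligent_course_planner.py | _categorize_technical_skills
-- ===== SOURCE A (Python) =====
-- from typing import Dict, Any, List, Tuple
--
-- def _categorize_technical_skills(skills: List[str]) -> Dict[str, List[str]]:
--     """Categorize technical skills by domain."""
--
--     categories = {
--         "data_analysis": [],
--         "financial_tools": [],
--         "project_management": [],
--         "technology": [],
--         "domain_specific": []
--     }
--
--     for skill in skills:
--         skill_lower = skill.lower()
--
--         if any(term in skill_lower for term in ["data", "analysis", "excel", "powerbi"]):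
--             categories["data_analysis"].append(skill)
--         elif any(term in skill_lower for term in ["sap", "financial", "accounting", "budget"]):
--             categories["financial_tools"].append(skill)
--         elif any(term in skill_lower for term in ["project", "management", "planning"]):
--             categories["project_management"].append(skill)
--         elif any(term in skill_lower for term in ["ai", "machine learning", "technology", "software"]):
--             categories["technology"].append(skill)
--         else:
--             categories["domain_specific"].append(skill)
--
--     return categories
-- ===== SOURCE B (Python) =====
-- def _categorize_technical_skills(skills):
--     """Categorize technical skills by domain (classifier + per-category filter)."""
--     rules = [
--         ("data_analysis", ["data", "analysis", "excel", "powerbi"]),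
--         ("financial_tools", ["sap", "financial", "accounting", "budget"]),
--         ("project_management", ["project", "management", "planning"]),
--         ("technology", ["ai", "machine learning", "technology", "software"]),
--     ]
--
--     def category_of(skill):
--         skill_lower = skill.lower()
--         for name, terms in rules:
--             if any(term in skill_lower for term in terms):
--                 return name
--         return "domain_specific"
--
--     names = [name for name, _ in rules] + ["domain_specific"]
--     return {name: [s for s in skills if category_of(s) == name] for name in names}
-- ===== Notes on version B (the rewrite author's own statement) =====
-- stated objective: idiomatic
-- what changed: Replaces A's single pass that appends into a mutable dict through an if/elif chain by a first-match classifier over an ordered rule table plus one filter pass per category building the dict by comprehension.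
import Mathlib
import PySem

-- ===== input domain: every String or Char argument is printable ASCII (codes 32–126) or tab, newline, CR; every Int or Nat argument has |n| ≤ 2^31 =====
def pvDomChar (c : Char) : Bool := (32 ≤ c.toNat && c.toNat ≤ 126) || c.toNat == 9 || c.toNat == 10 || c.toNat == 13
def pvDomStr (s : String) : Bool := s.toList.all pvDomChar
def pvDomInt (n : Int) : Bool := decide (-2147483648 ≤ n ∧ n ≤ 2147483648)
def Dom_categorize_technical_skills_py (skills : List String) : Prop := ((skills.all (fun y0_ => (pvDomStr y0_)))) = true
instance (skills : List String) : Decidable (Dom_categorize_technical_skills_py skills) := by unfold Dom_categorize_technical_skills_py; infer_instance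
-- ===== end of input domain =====

-- B replaces A's single pass of branch-appends into a mutable dict by a first-match classifier
-- plus one filter pass per category (same cost class; objective: idiomatic decomposition).

-- ===== PORT A =====
-- one iteration of A's for-loop: the if/elif chain appending skill to one bucket
def ctsStep (d : PySem.Dict String (List String)) (skill : String) : PySem.Dict String (List String) :=
  let skill_lower := PySem.Str.lower skill
  if (["data", "analysis", "excel", "powerbi"].any (fun t => PySem.Str.isIn t skill_lower)) then
    d.modify "data_analysis" [] (fun l => l ++ [skill])
  else if (["sap", "financial", "accounting", "budget"].any (fun t => PySem.Str.isIn t skill_lower)) then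
    d.modify "financial_tools" [] (fun l => l ++ [skill])
  else if (["project", "management", "planning"].any (fun t => PySem.Str.isIn t skill_lower)) then
    d.modify "project_management" [] (fun l => l ++ [skill])
  else if (["ai", "machine learning", "technology", "software"].any (fun t => PySem.Str.isIn t skill_lower)) then
    d.modify "technology" [] (fun l => l ++ [skill])
  else
    d.modify "domain_specific" [] (fun l => l ++ [skill])

def categorize_technical_skills_py (skills : List String) : List (String × List String) :=
  (skills.foldl ctsStep
    (PySem.Dict.ofList
      [("data_analysis", []), ("financial_tools", []), ("project_management", []),
       ("technology", []), ("domain_specific", [])])).items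

-- ===== PORT B =====
def ctsRules : List (String × List String) :=
  [("data_analysis", ["data", "analysis", "excel", "powerbi"]),
   ("financial_tools", ["sap", "financial", "accounting", "budget"]),
   ("project_management", ["project", "management", "planning"]),
   ("technology", ["ai", "machine learning", "technology", "software"])]

def ctsCategoryOf (skill : String) : String :=
  let skill_lower := PySem.Str.lower skill
  match ctsRules.find? (fun r => r.2.any (fun t => PySem.Str.isIn t skill_lower)) with
  | some r => r.1
  | none => "domain_specific"

def categorize_technical_skills_py_alt (skills : List String) : List (String × List String) :=
  (ctsRules.map Prod.fst ++ ["domain_specific"]).map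
    (fun name => (name, skills.filter (fun s => ctsCategoryOf s == name)))

-- ===== PRECONDITION & SPEC =====
def Spec_categorize_technical_skills_py (skills : List String) (out : List (String × List String)) : Prop := out = categorize_technical_skills_py_alt skills
instance (skills : List String) (out : List (String × List String)) : Decidable (Spec_categorize_technical_skills_py skills out) := by unfold Spec_categorize_technical_skills_py; infer_instance

-- ===== CLAIM (what is proved, stated in full; the proofs are below) =====
def Claim_equal_categorize_technical_skills_py : Prop := ∀ (skills : List String), Dom_categorize_technical_skills_py skills → Spec_categorize_technical_skills_py skills (categorize_technical_skills_py skills)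

-- ===== LEMMAS AND PROOFS =====

theorem cts_ofList_eq_mk (l1 l2 l3 l4 l5 : List String) :
    (PySem.Dict.ofList
      [("data_analysis", l1), ("financial_tools", l2), ("project_management", l3),
       ("technology", l4), ("domain_specific", l5)]) =
    PySem.Dict.mk
      [("data_analysis", l1), ("financial_tools", l2), ("project_management", l3),
       ("technology", l4), ("domain_specific", l5)] := by
  simp [PySem.Dict.ofList, PySem.Dict.update, PySem.Dict.insert, PySem.Dict.contains,
        PySem.Dict.empty]

theorem cts_invariant (skills : List String) (l1 l2 l3 l4 l5 : List String) :
    (skills.foldl ctsStep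
      (PySem.Dict.mk
        [("data_analysis", l1), ("financial_tools", l2), ("project_management", l3),
         ("technology", l4), ("domain_specific", l5)])).items =
    [("data_analysis", l1 ++ skills.filter (fun s => ctsCategoryOf s == "data_analysis")),
     ("financial_tools", l2 ++ skills.filter (fun s => ctsCategoryOf s == "financial_tools")),
     ("project_management", l3 ++ skills.filter (fun s => ctsCategoryOf s == "project_management")),
     ("technology", l4 ++ skills.filter (fun s => ctsCategoryOf s == "technology")),
     ("domain_specific", l5 ++ skills.filter (fun s => ctsCategoryOf s == "domain_specific"))] := by
  induction skills generalizing l1 l2 l3 l4 l5 with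
  | nil => simp [PySem.Dict.items]
  | cons a rest ih =>
    simp only [List.foldl_cons]
    by_cases h1 : (["data", "analysis", "excel", "powerbi"].any (fun t => PySem.Str.isIn t (PySem.Str.lower a))) = true
    · have hstep : ctsStep (PySem.Dict.mk [("data_analysis", l1), ("financial_tools", l2), ("project_management", l3), ("technology", l4), ("domain_specific", l5)]) a = PySem.Dict.mk [("data_analysis", l1 ++ [a]), ("financial_tools", l2), ("project_management", l3), ("technology", l4), ("domain_specific", l5)] := by
        simp only [ctsStep]
        rw [if_pos h1]
        simp [PySem.Dict.modify, PySem.Dict.insert, PySem.Dict.getD, PySem.Dict.get?, PySem.Dict.contains]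
      have hcat : ctsCategoryOf a = "data_analysis" := by
        simp only [ctsCategoryOf, ctsRules]
        rw [List.find?_cons_of_pos (by simpa using h1)]
      rw [hstep, ih]
      simp [hcat]
    · by_cases h2 : (["sap", "financial", "accounting", "budget"].any (fun t => PySem.Str.isIn t (PySem.Str.lower a))) = true
      · have hstep : ctsStep (PySem.Dict.mk [("data_analysis", l1), ("financial_tools", l2), ("project_management", l3), ("technology", l4), ("domain_specific", l5)]) a = PySem.Dict.mk [("data_analysis", l1), ("financial_tools", l2 ++ [a]), ("project_management", l3), ("technology", l4), ("domain_specific", l5)] := by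
          simp only [ctsStep]
          rw [if_neg h1]
          rw [if_pos h2]
          simp [PySem.Dict.modify, PySem.Dict.insert, PySem.Dict.getD, PySem.Dict.get?, PySem.Dict.contains]
        have hcat : ctsCategoryOf a = "financial_tools" := by
          simp only [ctsCategoryOf, ctsRules]
          rw [List.find?_cons_of_neg (by simpa using h1)]
          rw [List.find?_cons_of_pos (by simpa using h2)]
        rw [hstep, ih]
        simp [hcat]
      · by_cases h3 : (["project", "management", "planning"].any (fun t => PySem.Str.isIn t (PySem.Str.lower a))) = true
        · have hstep : ctsStep (PySem.Dict.mk [("data_analysis", l1), ("financial_tools", l2), ("project_management", l3), ("technology", l4), ("domain_specific", l5)]) a = PySem.Dict.mk [("data_analysis", l1), ("financial_tools", l2), ("project_management", l3 ++ [a]), ("technology", l4), ("domain_specific", l5)] := by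
            simp only [ctsStep]
            rw [if_neg h1]
            rw [if_neg h2]
            rw [if_pos h3]
            simp [PySem.Dict.modify, PySem.Dict.insert, PySem.Dict.getD, PySem.Dict.get?, PySem.Dict.contains]
          have hcat : ctsCategoryOf a = "project_management" := by
            simp only [ctsCategoryOf, ctsRules]
            rw [List.find?_cons_of_neg (by simpa using h1)]
            rw [List.find?_cons_of_neg (by simpa using h2)]
            rw [List.find?_cons_of_pos (by simpa using h3)]
          rw [hstep, ih]
          simp [hcat]
        · by_cases h4 : (["ai", "machine learning", "technology", "software"].any (fun t => PySem.Str.isIn t (PySem.Str.lower a))) = true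
          · have hstep : ctsStep (PySem.Dict.mk [("data_analysis", l1), ("financial_tools", l2), ("project_management", l3), ("technology", l4), ("domain_specific", l5)]) a = PySem.Dict.mk [("data_analysis", l1), ("financial_tools", l2), ("project_management", l3), ("technology", l4 ++ [a]), ("domain_specific", l5)] := by
              simp only [ctsStep]
              rw [if_neg h1]
              rw [if_neg h2]
              rw [if_neg h3]
              rw [if_pos h4]
              simp [PySem.Dict.modify, PySem.Dict.insert, PySem.Dict.getD, PySem.Dict.get?, PySem.Dict.contains]
            have hcat : ctsCategoryOf a = "technology" := by
              simp only [ctsCategoryOf, ctsRules]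
              rw [List.find?_cons_of_neg (by simpa using h1)]
              rw [List.find?_cons_of_neg (by simpa using h2)]
              rw [List.find?_cons_of_neg (by simpa using h3)]
              rw [List.find?_cons_of_pos (by simpa using h4)]
            rw [hstep, ih]
            simp [hcat]
          · have hstep : ctsStep (PySem.Dict.mk [("data_analysis", l1), ("financial_tools", l2), ("project_management", l3), ("technology", l4), ("domain_specific", l5)]) a = PySem.Dict.mk [("data_analysis", l1), ("financial_tools", l2), ("project_management", l3), ("technology", l4), ("domain_specific", l5 ++ [a])] := by
              simp only [ctsStep]
              rw [if_neg h1]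
              rw [if_neg h2]
              rw [if_neg h3]
              rw [if_neg h4]
              simp [PySem.Dict.modify, PySem.Dict.insert, PySem.Dict.getD, PySem.Dict.get?, PySem.Dict.contains]
            have hcat : ctsCategoryOf a = "domain_specific" := by
              simp only [ctsCategoryOf, ctsRules]
              rw [List.find?_cons_of_neg (by simpa using h1)]
              rw [List.find?_cons_of_neg (by simpa using h2)]
              rw [List.find?_cons_of_neg (by simpa using h3)]
              rw [List.find?_cons_of_neg (by simpa using h4)]
              rfl
            rw [hstep, ih]
            simp [hcat]

-- ===== VERDICT (by name: the statement is the Claim_ definition above) =====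
theorem categorize_technical_skills_py_spec : Claim_equal_categorize_technical_skills_py := by
  intro skills _
  show _ = _
  rw [categorize_technical_skills_py, cts_ofList_eq_mk, cts_invariant]
  simp [categorize_technical_skills_py_alt, ctsRules]
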